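-- pv_equiv track=rewrite | github.com/JakubDotPy/aoc2023 | day13/part2.py | compute
-- ===== SOURCE A (Python) =====
-- import itertools
--
-- xor_lines = lambda lines: tuple(a != b for a, b in zip(*lines))
--
-- def xor_fold(lines, idx: int):
--     right_part = lines[idx:]
--     left_part = lines[:idx][::-1]
--     return list(map(xor_lines, zip(left_part, right_part)))
--
-- def find_fold_index(lines: list[str]) -> int:
--     for fold_idx in range(len(lines)):
--         fold = xor_fold(lines, fold_idx)
--         # if there is only one symbol different, we found it
--         checksum = sum(itertools.chain.from_iterable(fold))
--         if checksum == 1: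
--             return fold_idx
--     return 0
--
-- def compute(s: str) -> int:
--     total = 0
--
--     for batch in s.split('\n\n'):
--         rows = batch.splitlines()
--         cols = list(zip(*rows))
--
--         column_idx = find_fold_index(cols)
--         row_idx = find_fold_index(rows)
--
--         total += column_idx + row_idx * 100
--
--     return total
-- ===== SOURCE B (Python) =====
-- def _fold_index(lines):
--     # Bucket pass: every pair of lines (i, j) with odd j - i can only be a
--     # mirrored pair of the single fold position (i + j + 1) // 2, so one sweep
--     # over such pairs accumulates each candidate's smudge total at once.
--     n = len(lines)
--     smudges = [0] * n
--     for i in range(n):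
--         row = lines[i]
--         for j in range(i + 1, n, 2):
--             smudges[(i + j + 1) // 2] += sum(a != b for a, b in zip(row, lines[j]))
--     for idx in range(1, n):
--         if smudges[idx] == 1:
--             return idx
--     return 0
--
-- def compute(s: str) -> int:
--     total = 0
--     for batch in s.split('\n\n'):
--         rows = batch.splitlines()
--         cols = list(zip(*rows))
--         total += _fold_index(cols) + 100 * _fold_index(rows)
--     return total
-- ===== Notes on version B (the rewrite author's own statement) =====
-- stated objective: alternative
-- what changed: B inverts the traversal: instead of A's loop over candidate fold positions each re-scanning its mirrored line pairs (building boolean xor-tuples, flattened and summed), B makes a single sweep over all line pairs (i,j) with odd gap, accumulating each pair's mismatch count into a bucket array at the unique fold position (i+j+1)//2 it can belong to, then scans the bucket array for the first total of exactly 1.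
import Mathlib
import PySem

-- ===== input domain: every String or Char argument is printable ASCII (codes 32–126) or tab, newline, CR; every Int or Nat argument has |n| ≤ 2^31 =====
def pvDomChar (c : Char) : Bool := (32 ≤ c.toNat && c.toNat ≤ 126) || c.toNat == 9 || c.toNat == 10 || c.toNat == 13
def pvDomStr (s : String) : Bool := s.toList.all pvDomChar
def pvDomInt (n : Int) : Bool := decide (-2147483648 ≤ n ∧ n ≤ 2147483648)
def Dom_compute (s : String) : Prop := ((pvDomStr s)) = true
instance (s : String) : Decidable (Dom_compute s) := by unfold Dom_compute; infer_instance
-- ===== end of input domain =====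

-- B replaces A's per-candidate mirrored-pair scans by a single bucketing sweep over
-- odd-gap line pairs followed by a scan of the bucket array (objective: alternative).

-- ===== PORT A =====

-- zip(*rows): Python's n-ary zip, ported by hand; exact: stops at the first exhausted row.
-- (shared by both ports: both Pythons build cols with list(zip(*rows)))
def pyZipStarGo (r : List Char) (rs : List (List Char)) : List (List Char) :=
  match r with
  | [] => []
  | c :: cr =>
      if rs.all (fun l => !l.isEmpty) then
        (c :: rs.map (fun l => l.headD ' ')) :: pyZipStarGo cr (rs.map (fun l => l.tail))
      else []

def pyZipStar (rows : List (List Char)) : List (List Char) :=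
  match rows with
  | [] => []
  | r :: rs => pyZipStarGo r rs

-- xor_lines = lambda lines: tuple(a != b for a, b in zip(*lines))
def xorLines (p : List Char × List Char) : List Bool :=
  (p.1.zip p.2).map (fun q => q.1 != q.2)

-- xor_fold: lines[idx:], lines[:idx][::-1]; idx comes from range(len(lines)), so the
-- slices are exactly drop/take (nonnegative in-range index)
def xorFold (lines : List (List Char)) (idx : Nat) : List (List Bool) :=
  (((lines.take idx).reverse).zip (lines.drop idx)).map xorLines

-- checksum = sum(itertools.chain.from_iterable(fold)) (Python sums booleans as 0/1)
def pyChecksum (fold : List (List Bool)) : Int :=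
  (fold.flatten.map (fun b => if b then (1 : Int) else 0)).sum

def ffiGo (lines : List (List Char)) : List Nat → Int
  | [] => 0
  | i :: rest => if pyChecksum (xorFold lines i) = 1 then (i : Int) else ffiGo lines rest

def find_fold_index (lines : List (List Char)) : Int :=
  ffiGo lines (List.range lines.length)

def compute (s : String) : Int :=
  (PySem.Chars.splitOn s.toList "\n\n".toList).foldl
    (fun total batch =>
      let rows := PySem.Chars.splitlines batch
      let cols := pyZipStar rows
      total + (find_fold_index cols + find_fold_index rows * 100)) 0

-- ===== PORT B =====

-- sum(a != b for a, b in zip(row, lines[j]))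
def mismAlt (u v : List Char) : Int :=
  ((u.zip v).countP (fun q => q.1 != q.2) : Nat)

-- range(i+1, n, 2): start i+1, step 2, (n-i)/2 elements (exact element count of the Python range)
def jsB (n i : Nat) : List Nat := List.range' (i + 1) ((n - i) / 2) 2

-- smudges[(i+j+1)//2] += sum(a != b for a, b in zip(row, lines[j]))
def bumpB (lines : List (List Char)) (i : Nat) (arr : List Int) (j : Nat) : List Int :=
  arr.set ((i + j + 1) / 2)
    (arr.getD ((i + j + 1) / 2) 0 + mismAlt (lines.getD i []) (lines.getD j []))

-- smudges = [0]*n; double loop over i, j accumulating into the bucket array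
def buildSmudges (lines : List (List Char)) : List Int :=
  (List.range lines.length).foldl
    (fun arr i => (jsB lines.length i).foldl (bumpB lines i) arr)
    (List.replicate lines.length (0 : Int))

-- for idx in range(1, n): if smudges[idx] == 1: return idx; return 0
def scanGo (arr : List Int) : List Nat → Int
  | [] => 0
  | q :: rest => if arr.getD q 0 = 1 then (q : Int) else scanGo arr rest

def fold_index_alt (lines : List (List Char)) : Int :=
  scanGo (buildSmudges lines) (List.range' 1 (lines.length - 1))

def compute_alt (s : String) : Int :=
  (PySem.Chars.splitOn s.toList "\n\n".toList).foldl
    (fun total batch =>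
      let rows := PySem.Chars.splitlines batch
      let cols := pyZipStar rows
      total + (fold_index_alt cols + 100 * fold_index_alt rows)) 0

-- ===== PRECONDITION & SPEC =====
def Spec_compute (s : String) (out : Int) : Prop := out = compute_alt s
instance (s : String) (out : Int) : Decidable (Spec_compute s out) := by unfold Spec_compute; infer_instance

-- ===== CLAIM (what is proved, stated in full; the proofs are below) =====
def Claim_equal_compute : Prop := ∀ (s : String), Dom_compute s → Spec_compute s (compute s)

-- ===== LEMMAS AND PROOFS =====

-- ---- A-side: checksum of xor_fold = sum of per-pair mismatch counts ----

theorem sum_indicator_eq_countP (l : List (Char × Char)) :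
    (l.map (fun q => if q.1 != q.2 then (1 : Int) else 0)).sum
      = (l.countP (fun q => q.1 != q.2) : Nat) := by
  induction l with
  | nil => simp
  | cons p l ih =>
      simp only [List.map_cons, List.sum_cons, List.countP_cons]
      by_cases h : p.1 != p.2
      · simp only [h, if_pos]; push_cast; omega
      · simp only [h, if_neg, Bool.false_eq_true, not_false_eq_true]; push_cast; omega

theorem checksum_pair (p : List Char × List Char) :
    ((xorLines p).map (fun b => if b then (1 : Int) else 0)).sum = mismAlt p.1 p.2 := by
  simp only [xorLines, mismAlt, List.map_map, Function.comp_def]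
  exact sum_indicator_eq_countP (p.1.zip p.2)

theorem flatten_map_sum (fl : List (List Bool)) (f : Bool → Int) :
    (fl.flatten.map f).sum = (fl.map (fun l => (l.map f).sum)).sum := by
  induction fl with
  | nil => rfl
  | cons l fl ih => simp only [List.flatten_cons, List.map_append, List.sum_append, List.map_cons, List.sum_cons, ih]

theorem checksum_eq_sum (lines : List (List Char)) (i : Nat) (hi : i < lines.length) :
    pyChecksum (xorFold lines i)
      = ((List.range (min i (lines.length - i))).map
          (fun k => mismAlt (lines.getD (i - 1 - k) []) (lines.getD (i + k) []))).sum := by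
  have hz : ((lines.take i).reverse.zip (lines.drop i)).map (fun p => mismAlt p.1 p.2)
      = (List.range (min i (lines.length - i))).map
          (fun k => mismAlt (lines.getD (i - 1 - k) []) (lines.getD (i + k) [])) := by
    apply List.ext_getElem
    · simp
    · intro k h1 h2
      have hk : k < min i (lines.length - i) := by simpa using h2
      have hk1 : i - 1 - k < lines.length := by omega
      have hk2 : i + k < lines.length := by omega
      simp only [List.getElem_map, List.getElem_zip, List.getElem_reverse, List.getElem_range]
      have ht : (lines.take i).length = i := by simp; omega
      rw [List.getElem_take, List.getElem_drop,
        List.getD_eq_getElem _ _ hk1, List.getD_eq_getElem _ _ hk2]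
      congr 2
      all_goals omega
  calc pyChecksum (xorFold lines i)
      = (((lines.take i).reverse.zip (lines.drop i)).map
          (fun p => ((xorLines p).map (fun b => if b then (1 : Int) else 0)).sum)).sum := by
        simp only [pyChecksum, xorFold, flatten_map_sum, List.map_map, Function.comp_def]
    _ = ((((lines.take i).reverse.zip (lines.drop i)).map
          (fun p => mismAlt p.1 p.2))).sum := by
        apply congrArg
        apply List.map_congr_left
        intro p _
        exact checksum_pair p
    _ = _ := by rw [hz]

-- ---- B-side: the bucket array ----

def tgtB (p : Nat × Nat) : Nat := (p.1 + p.2 + 1) / 2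

def wgtB (lines : List (List Char)) (p : Nat × Nat) : Int :=
  mismAlt (lines.getD p.1 []) (lines.getD p.2 [])

def stepB (lines : List (List Char)) (arr : List Int) (p : Nat × Nat) : List Int :=
  arr.set (tgtB p) (arr.getD (tgtB p) 0 + wgtB lines p)

def pairListB (n : Nat) : List (Nat × Nat) :=
  (List.range n).flatMap (fun i => (jsB n i).map (fun j => (i, j)))

theorem foldl_flatMap_eq {α β γ : Type} (g : β → List γ) (f : α → γ → α) :
    ∀ (l : List β) (a : α),
      (l.flatMap g).foldl f a = l.foldl (fun a i => (g i).foldl f a) a := by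
  intro l
  induction l with
  | nil => intro a; rfl
  | cons b l ih => intro a; simp only [List.flatMap_cons, List.foldl_append, List.foldl_cons, ih]

theorem buildSmudges_eq_pairs (lines : List (List Char)) :
    buildSmudges lines
      = (pairListB lines.length).foldl (stepB lines) (List.replicate lines.length (0 : Int)) := by
  unfold buildSmudges pairListB
  rw [foldl_flatMap_eq]
  have hfun : (fun (arr : List Int) (i : Nat) => (jsB lines.length i).foldl (bumpB lines i) arr)
      = fun (a : List Int) (i : Nat) => ((jsB lines.length i).map (fun j => (i, j))).foldl (stepB lines) a := by
    funext arr i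
    rw [List.foldl_map]
    rfl
  rw [hfun]

theorem getD_set_eq (arr : List Int) (t q : Nat) (v : Int) (ht : t < arr.length) :
    (arr.set t v).getD q 0 = if q = t then v else arr.getD q 0 := by
  by_cases hq : q < arr.length
  · rw [List.getD_eq_getElem _ _ (by simpa using hq), List.getD_eq_getElem _ _ hq,
      List.getElem_set]
    split_ifs with h1 h2 h3 <;> first | rfl | omega
  · have hqt : q ≠ t := by omega
    have h1 : (arr.set t v).length ≤ q := by simp; omega
    have h2 : arr.length ≤ q := by omega
    rw [if_neg hqt, List.getD_eq_default _ _ h1, List.getD_eq_default _ _ h2]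

theorem foldl_stepB_getD (lines : List (List Char)) (q : Nat) :
    ∀ (ps : List (Nat × Nat)) (arr : List Int), (∀ p ∈ ps, tgtB p < arr.length) →
      ((ps.foldl (stepB lines) arr).getD q 0)
        = arr.getD q 0 + ((ps.filter (fun p => tgtB p = q)).map (wgtB lines)).sum := by
  intro ps
  induction ps with
  | nil => intro arr _; simp
  | cons p ps ih =>
      intro arr h
      have hp : tgtB p < arr.length := h p (by simp)
      have hlen : (stepB lines arr p).length = arr.length := by
        simp [stepB]
      simp only [List.foldl_cons, List.filter_cons]
      rw [ih (stepB lines arr p) (fun p' hp' => by rw [hlen]; exact h p' (by simp [hp']))]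
      by_cases hc : tgtB p = q
      · simp only [hc, decide_true, if_pos, List.map_cons, List.sum_cons]
        rw [stepB, hc, getD_set_eq _ _ _ _ (by omega), if_pos rfl]
        ring
      · simp only [hc, decide_false, Bool.false_eq_true, if_neg, not_false_eq_true]
        rw [stepB, getD_set_eq _ _ _ _ hp, if_neg (fun h' => hc h'.symm)]

theorem mem_pairListB {n : Nat} {p : Nat × Nat} (h : p ∈ pairListB n) :
    p.1 < p.2 ∧ p.2 < n := by
  obtain ⟨i, hi, hj⟩ := List.mem_flatMap.mp h
  obtain ⟨j, hj2, rfl⟩ := List.mem_map.mp hj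
  obtain ⟨t, ht, rfl⟩ := List.mem_range'.mp hj2
  have hin := List.mem_range.mp hi
  refine ⟨by simp; omega, by simp; omega⟩

-- the j-loop keeps exactly the (at most one) j with (i+j+1)/2 = q
theorem jsB_filter (i q : Nat) :
    ∀ cnt, (List.range' (i + 1) cnt 2).filter (fun j => (i + j + 1) / 2 = q)
      = if i < q ∧ q ≤ i + cnt then [2 * q - 1 - i] else [] := by
  intro cnt
  induction cnt with
  | zero =>
      rw [List.range'_zero, List.filter_nil, if_neg (by omega)]
  | succ c ih =>
      rw [List.range'_concat, List.filter_append, ih]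
      simp only [List.filter_cons, List.filter_nil]
      by_cases hlast : (i + (i + 1 + 2 * c) + 1) / 2 = q
      · have hc1 : ¬(i < q ∧ q ≤ i + c) := by omega
        have hc2 : i < q ∧ q ≤ i + (c + 1) := by omega
        rw [if_pos (decide_eq_true hlast), if_neg hc1, if_pos hc2, List.nil_append]
        have he : i + 1 + 2 * c = 2 * q - 1 - i := by omega
        rw [he]
      · rw [if_neg (show ¬(decide ((i + (i + 1 + 2 * c) + 1) / 2 = q) = true) by
            simp only [decide_eq_true_eq]; exact hlast), List.append_nil]
        by_cases hc : i < q ∧ q ≤ i + c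
        · rw [if_pos hc, if_pos (show i < q ∧ q ≤ i + (c + 1) by omega)]
        · rw [if_neg hc, if_neg (show ¬(i < q ∧ q ≤ i + (c + 1)) by omega)]

theorem sum_if_range_eq_range' (g : Nat → Int) :
    ∀ (n : Nat) (a b : Nat),
      ((List.range n).map (fun i => if a ≤ i ∧ i < b then g i else 0)).sum
        = ((List.range' a (min b n - a)).map g).sum := by
  intro n
  induction n with
  | zero => intro a b; simp
  | succ n ih =>
      intro a b
      rw [List.range_succ, List.map_append, List.sum_append]
      rw [ih a b]
      simp only [List.map_cons, List.map_nil, List.sum_cons, List.sum_nil, add_zero]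
      by_cases hab : a ≤ n ∧ n < b
      · rw [if_pos hab]
        have h1 : min b (n + 1) - a = (min b n - a) + 1 := by omega
        have h2 : min b n - a = n - a := by omega
        rw [h1, List.range'_concat, List.map_append, List.sum_append]
        have h3 : a + 1 * (min b n - a) = n := by omega
        rw [h3]
        simp
      · rw [if_neg hab, add_zero]
        have hmm : min b (n + 1) - a = min b n - a := by omega
        rw [hmm]

theorem sum_range'_reverse (g : Nat → Int) :
    ∀ (m s : Nat), ((List.range' s m).map g).sum
      = ((List.range m).map (fun k => g (s + m - 1 - k))).sum := by
  intro m
  induction m with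
  | zero => intro s; simp
  | succ m ih =>
      intro s
      rw [List.range'_concat, List.map_append, List.sum_append, ih s]
      rw [List.range_succ_eq_map]
      simp only [List.map_cons, List.map_map, List.sum_cons, List.map_nil, List.sum_nil,
        add_zero, Function.comp_def]
      have h1 : s + (m + 1) - 1 - 0 = s + 1 * m := by omega
      have h2 : ∀ k ∈ List.range m, g (s + (m + 1) - 1 - (k + 1)) = g (s + m - 1 - k) := by
        intro k hk
        congr 1
        have := List.mem_range.mp hk
        omega
      rw [h1, List.map_congr_left h2]
      ring

-- bucket q of the built array = A's checksum at fold index q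
theorem buildSmudges_getD (lines : List (List Char)) (q : Nat) (hq : q < lines.length) :
    (buildSmudges lines).getD q 0 = pyChecksum (xorFold lines q) := by
  rw [buildSmudges_eq_pairs,
    foldl_stepB_getD lines q (pairListB lines.length)
      (List.replicate lines.length (0 : Int))
      (fun p hp => by
        have h := mem_pairListB hp
        simp only [List.length_replicate, tgtB]
        omega)]
  have hrep : (List.replicate lines.length (0 : Int)).getD q 0 = 0 := by
    rw [List.getD_eq_getElem _ _ (by simpa using hq)]
    simp
  rw [hrep, zero_add, checksum_eq_sum lines q hq]
  -- reduce the filtered pair sum to a sum over i of an if-term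
  have hstep : ((pairListB lines.length).filter (fun p => tgtB p = q)).map (wgtB lines)
      = (List.range lines.length).flatMap (fun i =>
          (((jsB lines.length i).filter (fun j => (i + j + 1) / 2 = q)).map
            (fun j => wgtB lines (i, j)))) := by
    unfold pairListB
    rw [List.filter_flatMap, List.map_flatMap]
    apply congrArg (fun g => List.flatMap g (List.range lines.length))
    funext i
    rw [List.filter_map, List.map_map]
    rfl
  rw [hstep]
  have hflat : ∀ (l : List Nat) (f : Nat → List Int),
      (l.flatMap f).sum = (l.map (fun i => (f i).sum)).sum := by
    intro l f
    induction l with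
    | nil => rfl
    | cons x l ih => simp only [List.flatMap_cons, List.sum_append, List.map_cons, List.sum_cons, ih]
  rw [hflat]
  have hinner : ∀ i ∈ List.range lines.length,
      (((jsB lines.length i).filter (fun j => (i + j + 1) / 2 = q)).map
          (fun j => wgtB lines (i, j))).sum
        = (if (2 * q - lines.length) ≤ i ∧ i < q then wgtB lines (i, 2 * q - 1 - i) else 0) := by
    intro i hi
    have hin : i < lines.length := List.mem_range.mp hi
    rw [jsB, jsB_filter i q ((lines.length - i) / 2)]
    by_cases hc : i < q ∧ q ≤ i + (lines.length - i) / 2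
    · rw [if_pos hc, if_pos (by omega)]
      simp
    · rw [if_neg hc, if_neg (by omega)]
      simp
  rw [List.map_congr_left hinner,
    sum_if_range_eq_range' (fun i => wgtB lines (i, 2 * q - 1 - i)) lines.length
      (2 * q - lines.length) q,
    Nat.min_eq_left hq.le, sum_range'_reverse]
  have hm : q - (2 * q - lines.length) = min q (lines.length - q) := by omega
  rw [hm]
  apply congrArg List.sum
  apply List.map_congr_left
  intro k hk
  have hk' := List.mem_range.mp hk
  simp only [wgtB]
  have e1 : 2 * q - lines.length + min q (lines.length - q) - 1 - k = q - 1 - k := by omega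
  have e2 : 2 * q - 1 - (q - 1 - k) = q + k := by omega
  rw [e1, e2]

-- ---- scan equivalence ----

theorem go_eq (lines : List (List Char)) :
    ∀ l : List Nat, (∀ i ∈ l, i < lines.length) →
      ffiGo lines l = scanGo (buildSmudges lines) l := by
  intro l
  induction l with
  | nil => intro _; rfl
  | cons i rest ih =>
      intro h
      have hi : i < lines.length := h i (by simp)
      simp only [ffiGo, scanGo, buildSmudges_getD lines i hi]
      by_cases hc : pyChecksum (xorFold lines i) = 1
      · rw [if_pos hc, if_pos hc]
      · rw [if_neg hc, if_neg hc, ih (fun j hj => h j (by simp [hj]))]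

theorem ffi_eq_alt (lines : List (List Char)) :
    find_fold_index lines = fold_index_alt lines := by
  unfold find_fold_index fold_index_alt
  rcases Nat.eq_zero_or_pos lines.length with h0 | hpos
  · simp [h0, ffiGo, scanGo]
  · obtain ⟨m, hm⟩ : ∃ m, lines.length = m + 1 := ⟨lines.length - 1, by omega⟩
    have hr : List.range lines.length = 0 :: List.range' 1 (lines.length - 1) := by
      rw [hm, List.range_eq_range', List.range'_succ, Nat.add_sub_cancel]
    rw [hr]
    have h0chk : pyChecksum (xorFold lines 0) = 0 := by
      simp [pyChecksum, xorFold]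
    simp only [ffiGo, h0chk]
    rw [if_neg (by norm_num)]
    apply go_eq
    intro i hi
    have := List.mem_range'_1.mp hi
    omega

theorem foldl_steps_eq {f g : Int → List Char → Int} (h : ∀ t b, f t b = g t b) :
    ∀ (l : List (List Char)) (t : Int), l.foldl f t = l.foldl g t := by
  intro l
  induction l with
  | nil => intro t; rfl
  | cons b l ih => intro t; simp only [List.foldl_cons, h, ih]

-- ===== VERDICT (by name: the statement is the Claim_ definition above) =====
theorem compute_spec : Claim_equal_compute := by
  intro s _
  unfold Spec_compute compute compute_alt
  apply foldl_steps_eq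
  intro t b
  simp only [ffi_eq_alt]
  ring
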